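-- pv_equiv track=rewrite | github.com/ch1kim0n1/DocGenie | src/docgenie/generator.py | _extract_requirements
-- ===== SOURCE A (Python) =====
-- from typing import Any, Dict, List
--
-- def _extract_requirements(dependencies: Dict[str, Any]) -> List[str]:
--     """Extract system requirements."""
--     requirements = []
--
--     if "package.json" in dependencies:
--         requirements.append("Node.js 14.0 or higher")
--         requirements.append("npm or yarn")
--
--     if any(key in dependencies for key in ["requirements.txt", "pyproject.toml", "setup.py"]):
--         requirements.append("Python 3.8 or higher")
--         requirements.append("pip")
--
--     if "Cargo.toml" in dependencies:
--         requirements.append("Rust 1.60 or higher")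
--         requirements.append("Cargo")
--
--     if "go.mod" in dependencies:
--         requirements.append("Go 1.18 or higher")
--
--     if "pom.xml" in dependencies:
--         requirements.append("Java 11 or higher")
--         requirements.append("Maven 3.6 or higher")
--
--     if not requirements:
--         requirements.append("See installation instructions below")
--
--     return requirements
-- ===== SOURCE B (Python) =====
-- from typing import Any, Dict, List
--
-- _KEY_TAG = {
--     "package.json": "node",
--     "requirements.txt": "python",
--     "pyproject.toml": "python",
--     "setup.py": "python",
--     "Cargo.toml": "rust",
--     "go.mod": "go",
--     "pom.xml": "java",
-- }
--
-- _TAG_REQS = {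
--     "node": ["Node.js 14.0 or higher", "npm or yarn"],
--     "python": ["Python 3.8 or higher", "pip"],
--     "rust": ["Rust 1.60 or higher", "Cargo"],
--     "go": ["Go 1.18 or higher"],
--     "java": ["Java 11 or higher", "Maven 3.6 or higher"],
-- }
--
-- def _extract_requirements(dependencies: Dict[str, Any]) -> List[str]:
--     """Extract system requirements."""
--     tags = {_KEY_TAG[key] for key in dependencies if key in _KEY_TAG}
--     requirements = [req for tag in ("node", "python", "rust", "go", "java")
--                     if tag in tags for req in _TAG_REQS[tag]]
--     return requirements or ["See installation instructions below"]
-- ===== Notes on version B (the rewrite author's own statement) =====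
-- stated objective: idiomatic
-- what changed: Instead of testing each hard-coded filename against the dict in five separate branches, B makes one pass over the dependency keys, mapping each through a filename-to-ecosystem reverse index into a set of detected tags, then emits the requirement strings for the detected tags in a fixed order (fallback when none).
import Mathlib
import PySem

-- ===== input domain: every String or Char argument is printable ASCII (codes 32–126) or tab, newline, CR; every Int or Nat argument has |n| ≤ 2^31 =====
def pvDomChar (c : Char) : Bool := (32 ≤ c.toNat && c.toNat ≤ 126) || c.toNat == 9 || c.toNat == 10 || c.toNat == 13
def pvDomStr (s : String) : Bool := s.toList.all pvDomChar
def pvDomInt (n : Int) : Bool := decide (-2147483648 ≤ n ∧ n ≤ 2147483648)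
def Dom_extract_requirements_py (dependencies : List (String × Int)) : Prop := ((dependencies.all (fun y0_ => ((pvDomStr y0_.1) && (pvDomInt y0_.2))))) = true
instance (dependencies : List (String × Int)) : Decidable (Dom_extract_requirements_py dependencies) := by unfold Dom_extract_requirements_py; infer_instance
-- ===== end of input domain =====

-- B replaces A's five hard-coded membership branches by a single pass over the
-- dependency keys that collects detected ecosystem tags in a set, then emits the
-- requirement strings per tag (idiomatic reverse-index decomposition; same output).


-- ===== PORT A =====
-- 'key in dependencies' for a dict: some entry has that key
def pyKeyInA (d : List (String × Int)) (k : String) : Bool := d.any (fun p => p.1 == k)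

def extract_requirements_py (dependencies : List (String × Int)) : List String :=
  let requirements : List String := []
  let requirements := if pyKeyInA dependencies "package.json" then
    requirements ++ ["Node.js 14.0 or higher", "npm or yarn"] else requirements
  let requirements := if (["requirements.txt", "pyproject.toml", "setup.py"].any
      (fun key => pyKeyInA dependencies key)) then
    requirements ++ ["Python 3.8 or higher", "pip"] else requirements
  let requirements := if pyKeyInA dependencies "Cargo.toml" then
    requirements ++ ["Rust 1.60 or higher", "Cargo"] else requirements
  let requirements := if pyKeyInA dependencies "go.mod" then
    requirements ++ ["Go 1.18 or higher"] else requirements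
  let requirements := if pyKeyInA dependencies "pom.xml" then
    requirements ++ ["Java 11 or higher", "Maven 3.6 or higher"] else requirements
  let requirements := if requirements.isEmpty then
    requirements ++ ["See installation instructions below"] else requirements
  requirements

-- ===== PORT B =====
-- the _KEY_TAG reverse index (filename → ecosystem tag)
def keyTag : PySem.Dict String String := PySem.Dict.mk
  [ ("package.json", "node"), ("requirements.txt", "python"), ("pyproject.toml", "python"),
    ("setup.py", "python"), ("Cargo.toml", "rust"), ("go.mod", "go"), ("pom.xml", "java") ]

-- the _TAG_REQS table (ecosystem tag → requirement strings)
def tagReqs : PySem.Dict String (List String) := PySem.Dict.mk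
  [ ("node", ["Node.js 14.0 or higher", "npm or yarn"]),
    ("python", ["Python 3.8 or higher", "pip"]),
    ("rust", ["Rust 1.60 or higher", "Cargo"]),
    ("go", ["Go 1.18 or higher"]),
    ("java", ["Java 11 or higher", "Maven 3.6 or higher"]) ]

def extract_requirements_py_alt (dependencies : List (String × Int)) : List String :=
  -- tags = {_KEY_TAG[key] for key in dependencies if key in _KEY_TAG}
  let tags : PySem.Set String := dependencies.foldl
    (fun s p => match PySem.Dict.get? keyTag p.1 with
      | some t => PySem.Set.add s t
      | none => s) PySem.Set.empty
  -- requirements = [req for tag in (...) if tag in tags for req in _TAG_REQS[tag]]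
  let requirements : List String := ["node", "python", "rust", "go", "java"].foldl
    (fun acc tag => if PySem.Set.contains tags tag
      then acc ++ PySem.Dict.getD tagReqs tag [] else acc) []
  -- return requirements or [fallback]
  if requirements.isEmpty then ["See installation instructions below"] else requirements

-- ===== PRECONDITION & SPEC =====
def Spec_extract_requirements_py (dependencies : List (String × Int)) (out : List String) : Prop := out = extract_requirements_py_alt dependencies
instance (dependencies : List (String × Int)) (out : List String) : Decidable (Spec_extract_requirements_py dependencies out) := by unfold Spec_extract_requirements_py; infer_instance

-- ===== CLAIM =====
def Claim_equal_extract_requirements_py : Prop := ∀ (dependencies : List (String × Int)), Dom_extract_requirements_py dependencies → Spec_extract_requirements_py dependencies (extract_requirements_py dependencies)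

-- ===== LEMMAS AND PROOFS =====

theorem contains_add_self {s : PySem.Set String} {t : String} :
    PySem.Set.contains (PySem.Set.add s t) t = true := by
  simp [PySem.Set.contains_eq_listContains, PySem.Set.mem_add]

theorem contains_add_ne {s : PySem.Set String} {u t : String} (hu : u ≠ t) :
    PySem.Set.contains (PySem.Set.add s u) t = PySem.Set.contains s t := by
  simp [PySem.Set.contains_eq_listContains, PySem.Set.mem_add, Ne.symm hu]

-- membership in the tag set accumulated by B's fold, as a formula over the input
theorem contains_tagFold (d : List (String × Int)) (s : PySem.Set String) (t : String) :
    PySem.Set.contains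
      (d.foldl (fun s p => match PySem.Dict.get? keyTag p.1 with
        | some u => PySem.Set.add s u
        | none => s) s) t
      = (PySem.Set.contains s t || d.any (fun p => (PySem.Dict.get? keyTag p.1).any (· == t))) := by
  induction d generalizing s with
  | nil => simp
  | cons p rest ih =>
    simp only [List.foldl_cons, List.any_cons]
    rw [ih]
    cases h : PySem.Dict.get? keyTag p.1 with
    | none => simp
    | some u =>
      simp only [Option.any_some]
      by_cases hu : u = t
      · subst hu
        rw [contains_add_self]
        simp
      · rw [contains_add_ne hu]
        have : (u == t) = false := by simp [hu]
        rw [this]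
        simp

-- keyTag lookup mapping to a given tag, expressed as filename equalities
theorem keyTag_to (k t : String) :
    (PySem.Dict.get? keyTag k).any (· == t)
      = (("package.json" == k && "node" == t) ||
         (("requirements.txt" == k || "pyproject.toml" == k || "setup.py" == k) && "python" == t) ||
         ("Cargo.toml" == k && "rust" == t) ||
         ("go.mod" == k && "go" == t) ||
         ("pom.xml" == k && "java" == t)) := by
  simp only [keyTag, PySem.Dict.get?_mk_cons]
  by_cases h1 : k = "package.json"
  · subst h1; simp
  by_cases h2 : k = "requirements.txt"
  · subst h2; simp
  by_cases h3 : k = "pyproject.toml"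
  · subst h3; simp
  by_cases h4 : k = "setup.py"
  · subst h4; simp
  by_cases h5 : k = "Cargo.toml"
  · subst h5; simp
  by_cases h6 : k = "go.mod"
  · subst h6; simp
  by_cases h7 : k = "pom.xml"
  · subst h7; simp
  have b1 : ("package.json" == k) = false := by simpa using Ne.symm h1
  have b2 : ("requirements.txt" == k) = false := by simpa using Ne.symm h2
  have b3 : ("pyproject.toml" == k) = false := by simpa using Ne.symm h3
  have b4 : ("setup.py" == k) = false := by simpa using Ne.symm h4
  have b5 : ("Cargo.toml" == k) = false := by simpa using Ne.symm h5
  have b6 : ("go.mod" == k) = false := by simpa using Ne.symm h6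
  have b7 : ("pom.xml" == k) = false := by simpa using Ne.symm h7
  simp [b1, b2, b3, b4, b5, b6, b7, PySem.Dict.get?]

-- a single scan deciding a disjunction equals the disjunction of two scans
theorem list_any_or {α : Type} (l : List α) (f g : α → Bool) :
    l.any (fun x => f x || g x) = (l.any f || l.any g) := by
  induction l with
  | nil => rfl
  | cons a l ih =>
    simp only [List.any_cons, ih]
    cases f a <;> cases g a <;> simp

-- flip the orientation of the key comparison inside a scan
theorem any_flip (d : List (String × Int)) (k : String) :
    d.any (fun p => k == p.1) = pyKeyInA d k := by
  unfold pyKeyInA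
  induction d with
  | nil => rfl
  | cons p rest ih => simp [List.any_cons, ih, BEq.comm]

-- closed-form boolean shape of A's branch chain
def chainA (b1 b2 b3 b4 b5 : Bool) : List String :=
  let r : List String := []
  let r := if b1 then r ++ ["Node.js 14.0 or higher", "npm or yarn"] else r
  let r := if b2 then r ++ ["Python 3.8 or higher", "pip"] else r
  let r := if b3 then r ++ ["Rust 1.60 or higher", "Cargo"] else r
  let r := if b4 then r ++ ["Go 1.18 or higher"] else r
  let r := if b5 then r ++ ["Java 11 or higher", "Maven 3.6 or higher"] else r
  if r.isEmpty then r ++ ["See installation instructions below"] else r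

-- closed-form boolean shape of B's emit fold + fallback
def chainB (b1 b2 b3 b4 b5 : Bool) : List String :=
  let r : List String := []
  let r := if b1 then r ++ ["Node.js 14.0 or higher", "npm or yarn"] else r
  let r := if b2 then r ++ ["Python 3.8 or higher", "pip"] else r
  let r := if b3 then r ++ ["Rust 1.60 or higher", "Cargo"] else r
  let r := if b4 then r ++ ["Go 1.18 or higher"] else r
  let r := if b5 then r ++ ["Java 11 or higher", "Maven 3.6 or higher"] else r
  if r.isEmpty then ["See installation instructions below"] else r

theorem chain_eq : ∀ b1 b2 b3 b4 b5 : Bool, chainA b1 b2 b3 b4 b5 = chainB b1 b2 b3 b4 b5 := by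
  decide

-- B's tag-set membership, per tag, as A-style key scans
theorem tagFoldOf (d : List (String × Int)) (t : String) :
    PySem.Set.contains
      (d.foldl (fun s p => match PySem.Dict.get? keyTag p.1 with
        | some u => PySem.Set.add s u
        | none => s) PySem.Set.empty) t
      = d.any (fun p => (PySem.Dict.get? keyTag p.1).any (· == t)) := by
  rw [contains_tagFold]
  rfl

theorem c_node (d : List (String × Int)) :
    PySem.Set.contains
      (d.foldl (fun s p => match PySem.Dict.get? keyTag p.1 with
        | some u => PySem.Set.add s u
        | none => s) PySem.Set.empty) "node" = pyKeyInA d "package.json" := by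
  rw [tagFoldOf]
  simp only [keyTag_to]
  rw [← any_flip]
  congr 1; funext p; simp

theorem c_python (d : List (String × Int)) :
    PySem.Set.contains
      (d.foldl (fun s p => match PySem.Dict.get? keyTag p.1 with
        | some u => PySem.Set.add s u
        | none => s) PySem.Set.empty) "python"
      = (pyKeyInA d "requirements.txt" || (pyKeyInA d "pyproject.toml" || (pyKeyInA d "setup.py" || false))) := by
  rw [tagFoldOf]
  simp only [keyTag_to]
  rw [show (pyKeyInA d "requirements.txt" || (pyKeyInA d "pyproject.toml" || (pyKeyInA d "setup.py" || false)))
      = (d.any (fun p => "requirements.txt" == p.1) || (d.any (fun p => "pyproject.toml" == p.1) || d.any (fun p => "setup.py" == p.1)))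
    from by rw [any_flip, any_flip, any_flip]; simp]
  rw [← list_any_or, ← list_any_or]
  congr 1; funext p; simp [Bool.or_assoc]

theorem c_rust (d : List (String × Int)) :
    PySem.Set.contains
      (d.foldl (fun s p => match PySem.Dict.get? keyTag p.1 with
        | some u => PySem.Set.add s u
        | none => s) PySem.Set.empty) "rust" = pyKeyInA d "Cargo.toml" := by
  rw [tagFoldOf]
  simp only [keyTag_to]
  rw [← any_flip]
  congr 1; funext p; simp

theorem c_go (d : List (String × Int)) :
    PySem.Set.contains
      (d.foldl (fun s p => match PySem.Dict.get? keyTag p.1 with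
        | some u => PySem.Set.add s u
        | none => s) PySem.Set.empty) "go" = pyKeyInA d "go.mod" := by
  rw [tagFoldOf]
  simp only [keyTag_to]
  rw [← any_flip]
  congr 1; funext p; simp

theorem c_java (d : List (String × Int)) :
    PySem.Set.contains
      (d.foldl (fun s p => match PySem.Dict.get? keyTag p.1 with
        | some u => PySem.Set.add s u
        | none => s) PySem.Set.empty) "java" = pyKeyInA d "pom.xml" := by
  rw [tagFoldOf]
  simp only [keyTag_to]
  rw [← any_flip]
  congr 1; funext p; simp

theorem extract_requirements_py_eq_alt (d : List (String × Int)) :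
    extract_requirements_py d = extract_requirements_py_alt d := by
  have hA : extract_requirements_py d
      = chainA (pyKeyInA d "package.json")
          (["requirements.txt", "pyproject.toml", "setup.py"].any (fun key => pyKeyInA d key))
          (pyKeyInA d "Cargo.toml") (pyKeyInA d "go.mod") (pyKeyInA d "pom.xml") := rfl
  have hB : extract_requirements_py_alt d
      = chainB
          (PySem.Set.contains
            (d.foldl (fun s p => match PySem.Dict.get? keyTag p.1 with
              | some u => PySem.Set.add s u
              | none => s) PySem.Set.empty) "node")
          (PySem.Set.contains
            (d.foldl (fun s p => match PySem.Dict.get? keyTag p.1 with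
              | some u => PySem.Set.add s u
              | none => s) PySem.Set.empty) "python")
          (PySem.Set.contains
            (d.foldl (fun s p => match PySem.Dict.get? keyTag p.1 with
              | some u => PySem.Set.add s u
              | none => s) PySem.Set.empty) "rust")
          (PySem.Set.contains
            (d.foldl (fun s p => match PySem.Dict.get? keyTag p.1 with
              | some u => PySem.Set.add s u
              | none => s) PySem.Set.empty) "go")
          (PySem.Set.contains
            (d.foldl (fun s p => match PySem.Dict.get? keyTag p.1 with
              | some u => PySem.Set.add s u
              | none => s) PySem.Set.empty) "java") := rfl
  rw [hA, hB, c_node, c_python, c_rust, c_go, c_java]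
  simp only [List.any_cons, List.any_nil]
  exact chain_eq _ _ _ _ _

-- ===== VERDICT =====
theorem extract_requirements_py_spec : Claim_equal_extract_requirements_py := by
  intro d _
  exact extract_requirements_py_eq_alt d
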